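-- pv_equiv track=rewrite | github.com/huyenpham2995/python2sre | time2code/week3/numeronymPlus/numeronym_plus.py | verify_numeronym_plus
-- ===== SOURCE A (Python) =====
-- def verify_numeronym_plus(numeronym, word):
--     # both "" or one of the input is ""
--     if numeronym == "":
--         # if both are "" => True
--         if word == "":
--             return True
--         # if word is not "" => False
--         else:
--             return False
--     else:
--         # if numeronym is not "" but word is "" => False
--         if word == "":
--             return False
--
--     # Both are not ""
--     # if first or (and) last character of numeronym is not a letter
--     if not numeronym[0].isalpha() or not numeronym[-1].isalpha():
--         return False
--
--     i = 0 # current position of numeronym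
--     j = 0 # current position of word
--
--     # traverse through each character of numeronym
--     while i < len(numeronym) and j < len(word):
--         expectedLength = 1
--         currNumeronymChar = numeronym[i]
--
--         # if the character is the letter, compare to the current letter of word
--         if currNumeronymChar.isalpha():
--             if currNumeronymChar != word[j]:
--                 return False
--             j += 1
--
--         # if the character is a number, grab all the numbers
--         elif currNumeronymChar.isnumeric():
--             #get the expected length
--             expectedLength = ""
--             while currNumeronymChar.isnumeric():
--                 expectedLength += currNumeronymChar
--                 i += 1
--                 currNumeronymChar = numeronym[i]
--             # move down i to the current position
--             i = i - 1
--             expectedLength = int(expectedLength)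
--
--             # if the expected length > the length of word from position i to the end => False
--             if expectedLength > len(word[j:]):
--                 return False
--
--             j = j + expectedLength # account for index 0
--
--         i += 1
--
--     # word is longer than expanded numeronym or the other way around
--     if j != len(word) or i != len(numeronym):
--         return False
--
--     return True
-- ===== SOURCE B (Python) =====
-- def tokenize(numeronym):
--     # one ('lit', ch) per alphabetic char, one ('skip', N) per maximal numeric run,
--     # one ('noop', None) per char that is neither alpha nor numeric
--     toks = []
--     i = 0
--     n = len(numeronym)
--     while i < n:
--         c = numeronym[i]
--         if c.isalpha():
--             toks.append(('lit', c))
--             i += 1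
--         elif c.isnumeric():
--             k = i
--             while k < n and numeronym[k].isnumeric():
--                 k += 1
--             toks.append(('skip', int(numeronym[i:k])))
--             i = k
--         else:
--             toks.append(('noop', None))
--             i += 1
--     return toks
--
--
-- def verify_numeronym_plus(numeronym, word):
--     if numeronym == "":
--         return word == ""
--     if word == "":
--         return False
--     if not (numeronym[0].isalpha() and numeronym[-1].isalpha()):
--         return False
--     j = 0
--     for kind, val in tokenize(numeronym):
--         if j >= len(word):
--             return False
--         if kind == 'lit':
--             if word[j] != val:
--                 return False
--             j += 1
--         elif kind == 'skip':
--             if val > len(word) - j: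
--                 return False
--             j += val
--     return j == len(word)
-- ===== Notes on version B (the rewrite author's own statement) =====
-- stated objective: alternative
-- what changed: B replaces A's single fused index-juggling while-loop (with its inner digit-collecting while and the i=i-1 back-step) by a two-phase design: first tokenize the numeronym into lit/skip/noop tokens, then consume the word with one pointer over the token list.
import Mathlib
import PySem

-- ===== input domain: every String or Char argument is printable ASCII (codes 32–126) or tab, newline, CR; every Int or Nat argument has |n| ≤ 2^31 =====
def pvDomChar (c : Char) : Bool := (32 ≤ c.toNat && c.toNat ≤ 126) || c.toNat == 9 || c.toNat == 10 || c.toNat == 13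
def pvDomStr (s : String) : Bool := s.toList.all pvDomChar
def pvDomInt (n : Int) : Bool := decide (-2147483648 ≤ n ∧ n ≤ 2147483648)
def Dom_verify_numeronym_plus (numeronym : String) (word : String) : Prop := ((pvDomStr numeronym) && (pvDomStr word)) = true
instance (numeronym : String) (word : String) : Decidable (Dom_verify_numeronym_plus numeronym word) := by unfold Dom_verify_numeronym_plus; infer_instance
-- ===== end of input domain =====

-- B re-implements A's fused two-pointer while-loop as tokenize-then-consume (two phases, same cost); return values proved equal on all inputs.
-- On the ASCII domain Dom_, Python's str.isnumeric coincides with str.isdigit; both ports use PySem.Chars.isdigit (exact there).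
-- Loops are written with a fuel parameter (always called with ns.length + 1, enough for every input) purely as a structural
-- totality guard; the lemmas below show the fuel never runs out, so each port computes exactly what its Python computes.

-- int(<digit string>): exact for the nonempty ASCII digit runs both programs apply int() to
def pyIntOfDigits (cs : List Char) : Nat := cs.foldl (fun a c => a * 10 + (c.toNat - 48)) 0

-- ===== PORT A =====
-- A's inner while collecting numeronym's digit run. numeronym[i] is read with getD ' ':
-- exact, because Python enters/continues this loop only strictly below the final alphabetic
-- character (guaranteed by the guard A has already passed), so the access never leaves range;
-- out of range, getD gives ' ', not a digit, so the condition still agrees with Python's.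
def pvGrabDigits (ns : List Char) (i : Nat) (acc : List Char) : Nat → List Char × Nat
  | 0 => (acc, i)
  | fuel + 1 =>
    if PySem.Chars.isdigit (ns.getD i ' ') then
      pvGrabDigits ns (i + 1) (acc ++ [ns.getD i ' ']) fuel
    else (acc, i)

-- A's main while-loop, step for step (i walks numeronym, j walks word;
-- len(word[j:]) is (ws.drop j).length; the numeric branch keeps A's i = i - 1 then i += 1).
def pvLoopA (ns ws : List Char) (i j : Nat) : Nat → Bool
  | 0 => false
  | fuel + 1 =>
    if i < ns.length ∧ j < ws.length then
      let c := ns.getD i ' '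
      if PySem.Chars.isalpha c then
        if c ≠ ws.getD j ' ' then false
        else pvLoopA ns ws (i + 1) (j + 1) fuel
      else if PySem.Chars.isdigit c then
        let r := pvGrabDigits ns i [] (ns.length + 1)
        let expectedLength := pyIntOfDigits r.1
        let i' := r.2 - 1
        if expectedLength > (ws.drop j).length then false
        else pvLoopA ns ws (i' + 1) (j + expectedLength) fuel
      else pvLoopA ns ws (i + 1) j fuel
    else decide (j = ws.length ∧ i = ns.length)

def verify_numeronym_plus (numeronym : String) (word : String) : Bool :=
  let ns := numeronym.toList
  let ws := word.toList
  if ns = [] then (if ws = [] then true else false)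
  else if ws = [] then false
  else if ¬ PySem.Chars.isalpha (ns.getD 0 ' ') ∨ ¬ PySem.Chars.isalpha (ns.getD (ns.length - 1) ' ') then
    false
  else pvLoopA ns ws 0 0 (ns.length + 1)

-- ===== PORT B =====
inductive PvTok
  | lit : Char → PvTok
  | skip : Nat → PvTok
  | noop : PvTok
deriving DecidableEq, Repr

-- Source B's inner `while k < n and numeronym[k].isnumeric(): k += 1`
def pvRunEnd (ns : List Char) (k : Nat) : Nat → Nat
  | 0 => k
  | fuel + 1 =>
    if k < ns.length ∧ PySem.Chars.isdigit (ns.getD k ' ') then pvRunEnd ns (k + 1) fuel else k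

-- Source B's tokenize loop (i is its index; numeronym[i:k] is PySem.List.slice)
def pvTokenize (ns : List Char) (i : Nat) : Nat → List PvTok
  | 0 => []
  | fuel + 1 =>
    if i < ns.length then
      let c := ns.getD i ' '
      if PySem.Chars.isalpha c then .lit c :: pvTokenize ns (i + 1) fuel
      else if PySem.Chars.isdigit c then
        let k := pvRunEnd ns i (ns.length + 1)
        .skip (pyIntOfDigits (PySem.List.slice ns (some (i : Int)) (some (k : Int)))) :: pvTokenize ns k fuel
      else .noop :: pvTokenize ns (i + 1) fuel
    else []

-- Source B's for-loop over the tokens, consuming word with pointer j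
def pvConsume (ws : List Char) (toks : List PvTok) (j : Nat) : Bool :=
  match toks with
  | [] => decide (j = ws.length)
  | t :: rest =>
    if j ≥ ws.length then false
    else
      match t with
      | .lit c => if ws.getD j ' ' ≠ c then false else pvConsume ws rest (j + 1)
      | .skip n => if n > ws.length - j then false else pvConsume ws rest (j + n)
      | .noop => pvConsume ws rest j

def verify_numeronym_plus_alt (numeronym : String) (word : String) : Bool :=
  let ns := numeronym.toList
  let ws := word.toList
  if ns = [] then decide (ws = [])
  else if ws = [] then false
  else if ¬ (PySem.Chars.isalpha (ns.getD 0 ' ') ∧ PySem.Chars.isalpha (ns.getD (ns.length - 1) ' ')) then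
    false
  else pvConsume ws (pvTokenize ns 0 (ns.length + 1)) 0

-- ===== PRECONDITION & SPEC =====
def Spec_verify_numeronym_plus (numeronym : String) (word : String) (out : Bool) : Prop := out = verify_numeronym_plus_alt numeronym word
instance (numeronym : String) (word : String) (out : Bool) : Decidable (Spec_verify_numeronym_plus numeronym word out) := by unfold Spec_verify_numeronym_plus; infer_instance

-- ===== CLAIM (what is proved, stated in full; the proofs are below) =====
def Claim_equal_verify_numeronym_plus : Prop := ∀ (numeronym : String) (word : String), Dom_verify_numeronym_plus numeronym word → Spec_verify_numeronym_plus numeronym word (verify_numeronym_plus numeronym word)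

-- ===== LEMMAS AND PROOFS =====

-- the digit run at position i, the shared yardstick for both ports' inner loops
def pvRun (ns : List Char) (i : Nat) : List Char := (ns.drop i).takeWhile PySem.Chars.isdigit

theorem pvRun_length_le (ns : List Char) (i : Nat) : (pvRun ns i).length ≤ ns.length - i := by
  have h1 := (List.takeWhile_prefix (l := ns.drop i) PySem.Chars.isdigit).length_le
  simpa [pvRun] using h1

theorem pvRun_head_digit (ns : List Char) (i : Nat) (h : PySem.Chars.isdigit (ns.getD i ' ')) :
    i < ns.length ∧ pvRun ns i = ns.getD i ' ' :: pvRun ns (i + 1) := by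
  have hi : i < ns.length := by
    by_contra hi
    rw [List.getD_eq_default _ _ (by omega)] at h
    exact absurd h (by decide)
  have hdrop : ns.drop i = ns.getD i ' ' :: ns.drop (i + 1) := by
    rw [List.drop_eq_getElem_cons hi]
    simp [List.getD_eq_getElem?_getD, List.getElem?_eq_getElem hi]
  refine ⟨hi, ?_⟩
  rw [pvRun, hdrop, List.takeWhile_cons_of_pos h, pvRun]

theorem pvRun_nil (ns : List Char) (i : Nat) (h : ¬ PySem.Chars.isdigit (ns.getD i ' ')) :
    pvRun ns i = [] := by
  by_cases hi : i < ns.length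
  · have hdrop : ns.drop i = ns.getD i ' ' :: ns.drop (i + 1) := by
      rw [List.drop_eq_getElem_cons hi]
      simp [List.getD_eq_getElem?_getD, List.getElem?_eq_getElem hi]
    rw [pvRun, hdrop, List.takeWhile_cons_of_neg (by simpa using h)]
  · rw [pvRun, List.drop_eq_nil_of_le (by omega)]
    rfl

theorem pvRunEnd_eq (ns : List Char) : ∀ fuel i, (pvRun ns i).length < fuel →
    pvRunEnd ns i fuel = i + (pvRun ns i).length := by
  intro fuel
  induction fuel with
  | zero => omega
  | succ fuel ih =>
    intro i hf
    by_cases h : PySem.Chars.isdigit (ns.getD i ' ')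
    · obtain ⟨hi, hrun⟩ := pvRun_head_digit ns i h
      rw [pvRunEnd, if_pos ⟨hi, h⟩, ih (i + 1) (by rw [hrun] at hf; simp at hf; omega)]
      rw [hrun]; simp; omega
    · rw [pvRunEnd, if_neg (by rintro ⟨-, hd⟩; exact h hd), pvRun_nil ns i h]
      simp
theorem pvGrabDigits_eq (ns : List Char) : ∀ fuel i acc, (pvRun ns i).length < fuel →
    pvGrabDigits ns i acc fuel = (acc ++ pvRun ns i, i + (pvRun ns i).length) := by
  intro fuel
  induction fuel with
  | zero => omega
  | succ fuel ih =>
    intro i acc hf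
    by_cases h : PySem.Chars.isdigit (ns.getD i ' ')
    · obtain ⟨hi, hrun⟩ := pvRun_head_digit ns i h
      rw [pvGrabDigits, if_pos h, ih (i + 1) _ (by rw [hrun] at hf; simp at hf; omega)]
      rw [hrun]; simp; omega
    · rw [pvGrabDigits, if_neg h, pvRun_nil ns i h]
      simp

theorem pvRun_eq_slice (ns : List Char) (i : Nat) :
    PySem.List.slice ns (some (i : Int)) (some ((i + (pvRun ns i).length : Nat) : Int))
      = pvRun ns i := by
  rw [PySem.List.slice_natCast]
  have hpre : pvRun ns i <+: ns.drop i := List.takeWhile_prefix _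
  have : i + (pvRun ns i).length - i = (pvRun ns i).length := by omega
  rw [this]
  exact (List.prefix_iff_eq_take.mp hpre).symm

theorem pvLoop_eq_consume (ns ws : List Char) :
    ∀ fa ft i j, i ≤ ns.length → ns.length - i < fa → ns.length - i < ft →
    pvLoopA ns ws i j fa = pvConsume ws (pvTokenize ns i ft) j := by
  intro fa
  induction fa with
  | zero => omega
  | succ fa ih =>
    intro ft i j hi hfa hft
    cases ft with
    | zero => omega
    | succ ft =>
    by_cases hil : i < ns.length
    · rw [pvTokenize, if_pos hil]
      by_cases hjl : j < ws.length
      · rw [pvLoopA, if_pos (show i < ns.length ∧ j < ws.length from ⟨hil, hjl⟩)]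
        by_cases hal : PySem.Chars.isalpha (ns.getD i ' ')
        · -- lit token
          rw [if_pos hal, if_pos hal]
          simp only [pvConsume, List.getD_eq_getElem?_getD]
          rw [if_neg (show ¬ j ≥ ws.length by omega)]
          by_cases hne : ns[i]?.getD ' ' = ws[j]?.getD ' '
          · rw [if_neg (show ¬ ns[i]?.getD ' ' ≠ ws[j]?.getD ' ' from fun hc => hc hne),
                if_neg (show ¬ ws[j]?.getD ' ' ≠ ns[i]?.getD ' ' from fun hc => hc hne.symm)]
            exact ih ft (i + 1) (j + 1) (by omega) (by omega) (by omega)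
          · rw [if_pos (show ns[i]?.getD ' ' ≠ ws[j]?.getD ' ' from hne),
                if_pos (show ws[j]?.getD ' ' ≠ ns[i]?.getD ' ' from fun hc => hne hc.symm)]
        · rw [if_neg hal, if_neg hal]
          by_cases hd : PySem.Chars.isdigit (ns.getD i ' ')
          · -- skip token
            rw [if_pos hd, if_pos hd]
            have hrl : (pvRun ns i).length ≤ ns.length - i := pvRun_length_le ns i
            have hrpos : 1 ≤ (pvRun ns i).length := by
              obtain ⟨-, hrun⟩ := pvRun_head_digit ns i hd
              rw [hrun]; simp
            rw [pvGrabDigits_eq ns (ns.length + 1) i [] (by omega),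
                pvRunEnd_eq ns (ns.length + 1) i (by omega)]
            simp only [List.nil_append, pvConsume]
            rw [if_neg (show ¬ j ≥ ws.length by omega), pvRun_eq_slice]
            rw [List.length_drop]
            by_cases hbig : pyIntOfDigits (pvRun ns i) > ws.length - j
            · rw [if_pos hbig, if_pos hbig]
            · rw [if_neg hbig, if_neg hbig]
              have hstep : i + (pvRun ns i).length - 1 + 1 = i + (pvRun ns i).length := by omega
              rw [hstep]
              exact ih ft (i + (pvRun ns i).length) (j + pyIntOfDigits (pvRun ns i))
                (by omega) (by omega) (by omega)
          · -- noop token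
            rw [if_neg hd, if_neg hd]
            simp only [pvConsume]
            rw [if_neg (show ¬ j ≥ ws.length by omega)]
            exact ih ft (i + 1) j (by omega) (by omega) (by omega)
      · -- word exhausted, numeronym not: both sides false
        rw [pvLoopA, if_neg (show ¬ (i < ns.length ∧ j < ws.length) by tauto),
            decide_eq_false (show ¬ (j = ws.length ∧ i = ns.length) by omega)]
        by_cases hal : PySem.Chars.isalpha (ns.getD i ' ')
        · rw [if_pos hal]
          simp only [pvConsume]
          rw [if_pos (show j ≥ ws.length by omega)]
        · rw [if_neg hal]
          by_cases hd : PySem.Chars.isdigit (ns.getD i ' ')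
          · rw [if_pos hd]
            simp only [pvConsume]
            rw [if_pos (show j ≥ ws.length by omega)]
          · rw [if_neg hd]
            simp only [pvConsume]
            rw [if_pos (show j ≥ ws.length by omega)]
    · -- numeronym exhausted
      have hieq : i = ns.length := by omega
      rw [pvTokenize, if_neg hil, pvLoopA, if_neg (show ¬ (i < ns.length ∧ j < ws.length) by tauto)]
      simp [pvConsume, hieq]

-- ===== VERDICT (by name: the statement is the Claim_ definition above) =====
theorem verify_numeronym_plus_spec : Claim_equal_verify_numeronym_plus := by
  intro numeronym word _
  unfold Spec_verify_numeronym_plus verify_numeronym_plus verify_numeronym_plus_alt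
  by_cases h1 : numeronym.toList = []
  · by_cases h2 : word.toList = [] <;> simp [h1, h2]
  · have hlen : numeronym.toList.length = numeronym.length := by simp
    have hl := pvLoop_eq_consume numeronym.toList word.toList
      (numeronym.length + 1) (numeronym.length + 1) 0 0
      (by omega) (by omega) (by omega)
    by_cases h2 : word.toList = [] <;> simp [h1, h2, hl]
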